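-- pv_equiv track=rewrite | github.com/dirtysalt/codes | aoc2024/day4.py | flat
-- ===== SOURCE A (Python) =====
-- def flat(grid):
--     n, m = len(grid), len(grid[0])
--     for i in range(n):
--         for j in range(m - 3):
--             yield grid[i][j:j + 4]
--
--     for j in range(m):
--         for i in range(n - 3):
--             buf = []
--             for k in range(4):
--                 buf.append(grid[i + k][j])
--             yield ''.join(buf)
--
--     for x, y in [(0, j) for j in range(m)] + [(i, 0) for i in range(1, n)]:
--         while x < n and y < m:
--             buf = []
--             for k in range(4):
--                 if (x + k) < n and (y + k) < m:
--                     buf.append(grid[x + k][y + k])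
--             yield ''.join(buf)
--             x += 1
--             y += 1
--
--     for x, y in [(0, j) for j in range(m)] + [(i, m - 1) for i in range(1, n)]:
--         while x < n and y >= 0:
--             buf = []
--             for k in range(4):
--                 if (x + k) < n and (y - k) >= 0:
--                     buf.append(grid[x + k][y - k])
--             yield ''.join(buf)
--             x += 1
--             y -= 1
-- ===== SOURCE B (Python) =====
-- def flat(grid):
--     n, m = len(grid), len(grid[0])
--     rows = [r[:m] for r in grid]
--
--     def full_windows(line):
--         # only complete 4-char windows, via four shifted copies zipped together
--         return [''.join(w) for w in zip(line, line[1:], line[2:], line[3:])]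
--
--     def tail_windows(line):
--         # every window position, including the truncated tails at the end
--         return [line[k:k + 4] for k in range(len(line))]
--
--     out = []
--     for r in rows:
--         out += full_windows(r)
--     for col in zip(*rows):
--         out += full_windows(col)
--     for x, y in [(0, j) for j in range(m)] + [(i, 0) for i in range(1, n)]:
--         d = ''.join(rows[x + t][y + t] for t in range(min(n - x, m - y)))
--         out += tail_windows(d)
--     for x, y in [(0, j) for j in range(m)] + [(i, m - 1) for i in range(1, n)]:
--         d = ''.join(rows[x + t][y - t] for t in range(min(n - x, y + 1)))
--         out += tail_windows(d)
--     return out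
-- ===== Notes on version B (the rewrite author's own statement) =====
-- stated objective: alternative
-- what changed: B replaces A's per-window inner character loops and diagonal while-walks by line-based windowing: complete row/column windows come from zipping four shifted copies of each line (columns from zip(*rows)), and each diagonal is built once as a string of computed length min(n-x,m-y) (resp. min(n-x,y+1)) and then sliced at every tail position.
import Mathlib
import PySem

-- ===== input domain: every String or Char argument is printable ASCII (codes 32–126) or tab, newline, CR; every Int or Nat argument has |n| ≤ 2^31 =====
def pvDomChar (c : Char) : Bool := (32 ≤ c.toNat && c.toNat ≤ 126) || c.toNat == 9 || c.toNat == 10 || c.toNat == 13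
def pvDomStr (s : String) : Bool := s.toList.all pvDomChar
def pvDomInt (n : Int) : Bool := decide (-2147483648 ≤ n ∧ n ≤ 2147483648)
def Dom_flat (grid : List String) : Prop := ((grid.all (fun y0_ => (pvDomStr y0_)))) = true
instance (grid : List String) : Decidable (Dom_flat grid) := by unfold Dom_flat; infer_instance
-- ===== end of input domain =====

-- B windows whole lines (rows/columns by zipping four shifted copies, diagonals built once with a
-- computed length and then sliced at every tail position) instead of A's per-window character loops
-- and while-walks; an alternative decomposition with the same cost, same return value on Pre_flat.

-- ===== PORT A =====
-- A's down-right-diagonal while loop: at each position join the ≤4 in-bounds chars, then step (x+1,y+1).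
-- grid[x+k][y+k] is modelled with getD defaults; under Pre_flat every access is in bounds, as in Python.
def pvDiagA (g : List (List Char)) (n m x y : Nat) : List String :=
  if h : x < n ∧ y < m then
    String.ofList ((List.range 4).filterMap fun k =>
      if x + k < n ∧ y + k < m then some ((g.getD (x + k) []).getD (y + k) ' ') else none)
    :: pvDiagA g n m (x + 1) (y + 1)
  else []
termination_by n - x
decreasing_by omega

-- A's down-left-diagonal while loop; y may go negative, as in Python, so it is an Int.
def pvAdiagA (g : List (List Char)) (n : Nat) (m : Nat) (x : Nat) (y : Int) : List String :=
  if h : x < n ∧ 0 ≤ y then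
    String.ofList ((List.range 4).filterMap fun k =>
      if x + k < n ∧ 0 ≤ y - (k : Int) then some ((g.getD (x + k) []).getD (y - (k : Int)).toNat ' ') else none)
    :: pvAdiagA g n m (x + 1) (y - 1)
  else []
termination_by n - x
decreasing_by omega

def flat (grid : List String) : List String :=
  let n := grid.length
  let m := grid.headI.length          -- len(grid[0]); Pre_flat excludes grid = [] (Python IndexError)
  let g := grid.map String.toList
  -- rows: grid[i][j:j+4]; with 0 ≤ j the Python slice is (drop j).take 4 (PySem.List.slice_natCast_add)
  ((List.range n).flatMap fun i =>
    (List.range (m - 3)).map fun j => String.ofList (((g.getD i []).drop j).take 4))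
  -- columns: ''.join(grid[i+k][j] for k in range(4))
  ++ ((List.range m).flatMap fun j =>
    (List.range (n - 3)).map fun i =>
      String.ofList ((List.range 4).map fun k => (g.getD (i + k) []).getD j ' '))
  -- down-right diagonals, starts [(0,j) for j in range(m)] + [(i,0) for i in range(1,n)]
  ++ (((List.range m).map (fun j => ((0 : Nat), j)) ++ (List.range' 1 (n - 1)).map fun i => (i, 0)).flatMap
      fun p : Nat × Nat => pvDiagA g n m p.1 p.2)
  -- down-left diagonals, starts [(0,j) for j in range(m)] + [(i,m-1) for i in range(1,n)]
  ++ (((List.range m).map (fun j => ((0 : Nat), (j : Int))) ++ (List.range' 1 (n - 1)).map fun i => (i, (m : Int) - 1)).flatMap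
      fun p : Nat × Int => pvAdiagA g n m p.1 p.2)

-- ===== PORT B =====
-- full_windows(line): Python's zip(line, line[1:], line[2:], line[3:]) — a 4-ary zip of shifted
-- copies — is ported exactly as nested binary zips (same truncation to the shortest, here len-3).
def pvWin4 (l : List Char) : List String :=
  ((l.zip (l.drop 1)).zip ((l.drop 2).zip (l.drop 3))).map
    fun p => String.ofList [p.1.1, p.1.2, p.2.1, p.2.2]

-- tail_windows(line): line[k:k+4] for k in range(len(line)) (0 ≤ k, so the slice is drop-then-take)
def pvTails (l : List Char) : List String :=
  (List.range l.length).map fun k => String.ofList ((l.drop k).take 4)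

-- zip(*rows): ported by hand, exactly Python's semantics — min? of the row lengths many columns,
-- column j holding each row's j-th char (in bounds for every j below the minimum length).
def pvZipStar (rows : List (List Char)) : List (List Char) :=
  (List.range (((rows.map List.length).min?).getD 0)).map
    fun j => rows.map (fun r => r.getD j ' ')

def flat_alt (grid : List String) : List String :=
  let n := grid.length
  let m := grid.headI.length
  let rows := grid.map fun s => s.toList.take m      -- r[:m] (PySem.List.slice_to_natCast)
  (rows.flatMap pvWin4)
  ++ ((pvZipStar rows).flatMap pvWin4)
  -- each down-right diagonal built once: rows[x+t][y+t] for t in range(min(n-x, m-y))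
  ++ ((((List.range m).map fun j => ((0 : Nat), j)) ++ (List.range' 1 (n - 1)).map fun i => (i, 0)).flatMap
      fun p : Nat × Nat =>
        pvTails ((List.range (min (n - p.1) (m - p.2))).map fun t =>
          (rows.getD (p.1 + t) []).getD (p.2 + t) ' '))
  -- each down-left diagonal built once: rows[x+t][y-t] for t in range(min(n-x, y+1)); y is m-1 or j (Int, as y+1 may be 0)
  ++ ((((List.range m).map fun j => ((0 : Nat), (j : Int))) ++ (List.range' 1 (n - 1)).map fun i => (i, (m : Int) - 1)).flatMap
      fun p : Nat × Int =>
        pvTails ((List.range (min ((n : Int) - p.1) (p.2 + 1)).toNat).map fun t =>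
          (rows.getD (p.1 + t) []).getD (p.2 - (t : Int)).toNat ' '))

-- ===== PRECONDITION & SPEC =====
-- Pre_flat = exactly the inputs where Python A returns: a nonempty grid whose every row is at least
-- as long as row 0 (an empty grid, or a row shorter than row 0, makes A raise IndexError).
def Pre_flat (grid : List String) : Prop :=
  grid ≠ [] ∧ ∀ s ∈ grid, grid.headI.length ≤ s.length
instance (grid : List String) : Decidable (Pre_flat grid) := by unfold Pre_flat; infer_instance

def pvWitness_flat : List String := ["XMAS", "MASX", "ASXM", "SXMA"]

def Spec_flat (grid : List String) (out : List String) : Prop := out = flat_alt grid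
instance (grid : List String) (out : List String) : Decidable (Spec_flat grid out) := by unfold Spec_flat; infer_instance

-- ===== CLAIM (what is proved, stated in full; the proofs are below) =====
def Claim_equal_flat : Prop := ∀ (grid : List String), Dom_flat grid → Pre_flat grid → Spec_flat grid (flat grid)

-- ===== LEMMAS AND PROOFS =====

-- proof-only helpers: the diagonal through (x,y) as one list of characters
def pvDiagStr (rows : List (List Char)) (n m x y : Nat) : List Char :=
  if h : x < n ∧ y < m then (rows.getD x []).getD y ' ' :: pvDiagStr rows n m (x + 1) (y + 1) else []
termination_by n - x
decreasing_by omega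

def pvAdiagStr (rows : List (List Char)) (n : Nat) (x : Nat) (y : Int) : List Char :=
  if h : x < n ∧ 0 ≤ y then (rows.getD x []).getD y.toNat ' ' :: pvAdiagStr rows n (x + 1) (y - 1) else []
termination_by n - x
decreasing_by omega

theorem pv_flatMap_range_getD {α β : Type} (l : List α) (d : α) (F : α → List β) :
    (List.range l.length).flatMap (fun i => F (l.getD i d)) = l.flatMap F := by
  induction l with
  | nil => simp
  | cons a l ih =>
      simp only [List.length_cons, List.range_succ_eq_map, List.flatMap_cons, List.flatMap_map]
      simp only [List.getD_cons_zero, List.getD_cons_succ]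
      rw [ih]

theorem pv_map_range_getD {α β : Type} (l : List α) (d : α) (F : α → β) :
    (List.range l.length).map (fun i => F (l.getD i d)) = l.map F := by
  induction l with
  | nil => simp
  | cons a l ih =>
      simp only [List.length_cons, List.range_succ_eq_map, List.map_cons, List.map_map]
      simp only [Function.comp_def, List.getD_cons_zero, List.getD_cons_succ]
      rw [ih]

theorem pv_getD_map_take (g : List (List Char)) (i m : Nat) :
    (g.map (fun r => r.take m)).getD i [] = (g.getD i []).take m := by
  simp only [List.getD_eq_getElem?_getD, List.getElem?_map]
  cases g[i]? <;> simp

theorem pv_getD_take_lt {j m : Nat} (l : List Char) (d : Char) (h : j < m) :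
    (l.take m).getD j d = l.getD j d := by
  simp only [List.getD_eq_getElem?_getD, List.getElem?_take]
  simp [h]

theorem pv_window_take {j m : Nat} (r : List Char) (h : j + 4 ≤ m) :
    ((r.take m).drop j).take 4 = (r.drop j).take 4 := by
  rw [List.drop_take, List.take_take]
  congr 1
  omega

theorem pv_take4_drop {k : Nat} (l : List Char) (h : k + 4 ≤ l.length) :
    (l.drop k).take 4 = [l.getD k ' ', l.getD (k+1) ' ', l.getD (k+2) ' ', l.getD (k+3) ' '] := by
  rw [List.getD_eq_getElem l ' ' (show k < l.length by omega),
      List.getD_eq_getElem l ' ' (show k+1 < l.length by omega),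
      List.getD_eq_getElem l ' ' (show k+2 < l.length by omega),
      List.getD_eq_getElem l ' ' (show k+3 < l.length by omega)]
  apply List.ext_getElem
  · simp; omega
  · intro t h1 h2
    simp only [List.length_take, List.length_drop] at h1
    rw [List.getElem_take, List.getElem_drop]
    have ht : t < 4 := by omega
    interval_cases t <;> simp

theorem pv_win4_eq (l : List Char) :
    pvWin4 l = (List.range (l.length - 3)).map fun j => String.ofList ((l.drop j).take 4) := by
  apply List.ext_getElem
  · simp only [pvWin4, List.length_map, List.length_zip, List.length_drop, List.length_range]
    omega
  · intro k h1 h2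
    simp only [pvWin4, List.length_map, List.length_zip, List.length_drop] at h1
    simp only [pvWin4, List.getElem_map, List.getElem_zip, List.getElem_drop, List.getElem_range]
    rw [pv_take4_drop l (by omega)]
    rw [List.getD_eq_getElem l ' ' (show k < l.length by omega),
        List.getD_eq_getElem l ' ' (show k+1 < l.length by omega),
        List.getD_eq_getElem l ' ' (show k+2 < l.length by omega),
        List.getD_eq_getElem l ' ' (show k+3 < l.length by omega)]
    congr 2
    simp [Nat.add_comm]

theorem pv_col_window {n i : Nat} (c : Nat → Char) (h : i + 4 ≤ n) :
    (((List.range n).map c).drop i).take 4 = (List.range 4).map fun k => c (i + k) := by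
  apply List.ext_getElem
  · simp; omega
  · intro k h1 h2
    simp only [List.getElem_take, List.getElem_drop, List.getElem_map, List.getElem_range]

theorem pv_flatMap_congr {α β : Type} {l : List α} {f h : α → List β}
    (H : ∀ a ∈ l, f a = h a) : l.flatMap f = l.flatMap h := by
  simp only [List.flatMap_def]
  exact congrArg List.flatten (List.map_congr_left H)

theorem pv_foldl_min_const : ∀ (t : List Nat) (m : Nat), (∀ x ∈ t, x = m) → t.foldl min m = m := by
  intro t
  induction t with
  | nil => simp
  | cons b t ih =>
      intro m h
      simp only [List.foldl_cons]
      rw [h b (by simp), Nat.min_self]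
      exact ih m (fun x hx => h x (by simp [hx]))

theorem pv_min?_const {l : List Nat} {m : Nat} (hne : l ≠ []) (hall : ∀ x ∈ l, x = m) :
    l.min? = some m := by
  cases l with
  | nil => cases hne rfl
  | cons a t =>
      rw [List.min?_cons']
      have ha : a = m := hall a (by simp)
      subst ha
      rw [pv_foldl_min_const t a (fun x hx => hall x (by simp [hx]))]

-- the down-right diagonal string equals the computed-length comprehension B uses
theorem pv_diagStr_eq (rows : List (List Char)) (n m : Nat) :
    ∀ (c x y : Nat), n - x ≤ c →
      pvDiagStr rows n m x y
        = (List.range (min (n - x) (m - y))).map fun t => (rows.getD (x + t) []).getD (y + t) ' ' := by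
  intro c
  induction c with
  | zero =>
      intro x y hc
      rw [pvDiagStr, dif_neg (by omega)]
      rw [show min (n - x) (m - y) = 0 by omega]
      simp
  | succ c ih =>
      intro x y hc
      by_cases h : x < n ∧ y < m
      · rw [pvDiagStr, dif_pos h]
        have hm : min (n - x) (m - y) = (min (n - (x+1)) (m - (y+1))) + 1 := by omega
        rw [hm, List.range_succ_eq_map, List.map_cons]
        refine congrArg₂ List.cons (by simp) ?_
        rw [ih (x + 1) (y + 1) (by omega), List.map_map]
        apply List.map_congr_left
        intro t _
        simp only [Function.comp_apply]
        rw [show x + 1 + t = x + (t + 1) from by omega,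
            show y + 1 + t = y + (t + 1) from by omega]
      · rw [pvDiagStr, dif_neg h]
        rw [show min (n - x) (m - y) = 0 by omega]
        simp

-- the down-left diagonal string equals the computed-length comprehension B uses
theorem pv_adiagStr_eq (rows : List (List Char)) (n : Nat) :
    ∀ (c x : Nat) (y : Int), n - x ≤ c →
      pvAdiagStr rows n x y
        = (List.range (min ((n : Int) - x) (y + 1)).toNat).map fun t =>
            (rows.getD (x + t) []).getD (y - (t : Int)).toNat ' ' := by
  intro c
  induction c with
  | zero =>
      intro x y hc
      rw [pvAdiagStr, dif_neg (by omega)]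
      rw [show (min ((n : Int) - x) (y + 1)).toNat = 0 by omega]
      simp
  | succ c ih =>
      intro x y hc
      by_cases h : x < n ∧ 0 ≤ y
      · rw [pvAdiagStr, dif_pos h]
        have hm : (min ((n : Int) - x) (y + 1)).toNat
            = (min ((n : Int) - (x+1)) ((y - 1) + 1)).toNat + 1 := by omega
        rw [hm, List.range_succ_eq_map, List.map_cons]
        refine congrArg₂ List.cons (by norm_num) ?_
        rw [ih (x + 1) (y - 1) (by omega), List.map_map]
        apply List.map_congr_left
        intro t _
        simp only [Function.comp_apply]
        rw [show x + 1 + t = x + (t + 1) from by omega,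
            show y - 1 - (t : Int) = y - ((t : Nat) + 1 : Nat) from by push_cast; ring]
      · rw [pvAdiagStr, dif_neg h]
        rw [show (min ((n : Int) - x) (y + 1)).toNat = 0 by omega]
        simp

theorem pv_windows_cons (c : Char) (d : List Char) :
    pvTails (c :: d) = String.ofList ((c :: d).take 4) :: pvTails d := by
  simp only [pvTails, List.length_cons, List.range_succ_eq_map, List.map_cons, List.map_map,
    List.drop_zero]
  congr 1

theorem pv_diag_take (g : List (List Char)) (n m : Nat) :
    ∀ (t x y : Nat), (pvDiagStr (g.map (fun r => r.take m)) n m x y).take t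
      = (List.range t).filterMap fun k =>
          if x + k < n ∧ y + k < m then some ((g.getD (x + k) []).getD (y + k) ' ') else none := by
  intro t
  induction t with
  | zero => intro x y; simp
  | succ t ih =>
      intro x y
      by_cases h : x < n ∧ y < m
      · rw [pvDiagStr, dif_pos h, List.take_succ_cons, List.range_succ_eq_map]
        simp only [List.filterMap_cons, List.filterMap_map]
        rw [if_pos (show x + 0 < n ∧ y + 0 < m by omega)]
        congr 1
        · rw [pv_getD_map_take, pv_getD_take_lt _ _ h.2]
          simp
        · rw [ih (x + 1) (y + 1)]
          apply List.filterMap_congr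
          intro k _
          simp only [Function.comp_apply]
          have e1 : x + Nat.succ k = x + 1 + k := by omega
          have e2 : y + Nat.succ k = y + 1 + k := by omega
          rw [e1, e2]
      · rw [pvDiagStr, dif_neg h, List.take_nil]
        symm
        rw [List.filterMap_eq_nil_iff]
        intro k _
        rw [if_neg]
        omega

theorem pv_adiag_take (g : List (List Char)) (n m : Nat) :
    ∀ (t : Nat) (x : Nat) (y : Int), y < (m : Int) →
      (pvAdiagStr (g.map (fun r => r.take m)) n x y).take t
      = (List.range t).filterMap fun k =>
          if x + k < n ∧ 0 ≤ y - (k : Int) then some ((g.getD (x + k) []).getD (y - (k : Int)).toNat ' ') else none := by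
  intro t
  induction t with
  | zero => intro x y _; simp
  | succ t ih =>
      intro x y hy
      by_cases h : x < n ∧ 0 ≤ y
      · rw [pvAdiagStr, dif_pos h, List.take_succ_cons, List.range_succ_eq_map]
        simp only [List.filterMap_cons, List.filterMap_map]
        rw [if_pos (show x + 0 < n ∧ 0 ≤ y - ((0 : Nat) : Int) by constructor <;> omega)]
        congr 1
        · rw [pv_getD_map_take, pv_getD_take_lt _ _ (show y.toNat < m by omega)]
          congr 2
          omega
        · rw [ih (x + 1) (y - 1) (by omega)]
          apply List.filterMap_congr
          intro k _
          simp only [Function.comp_apply]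
          have e1 : x + Nat.succ k = x + 1 + k := by omega
          have e2 : y - (Nat.succ k : Int) = y - 1 - (k : Int) := by push_cast; ring
          rw [e1, e2]
      · rw [pvAdiagStr, dif_neg h, List.take_nil]
        symm
        rw [List.filterMap_eq_nil_iff]
        intro k _
        rw [if_neg]
        omega

theorem pv_diag_eq (g : List (List Char)) (n m : Nat) :
    ∀ (c x y : Nat), n - x ≤ c →
      pvDiagA g n m x y = pvTails (pvDiagStr (g.map (fun r => r.take m)) n m x y) := by
  intro c
  induction c with
  | zero =>
      intro x y hc
      rw [pvDiagA, dif_neg (by omega), pvDiagStr, dif_neg (by omega)]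
      rfl
  | succ c ih =>
      intro x y hc
      by_cases h : x < n ∧ y < m
      · have hstr : pvDiagStr (g.map (fun r => r.take m)) n m x y
            = ((g.map (fun r => r.take m)).getD x []).getD y ' '
              :: pvDiagStr (g.map (fun r => r.take m)) n m (x + 1) (y + 1) := by
          rw [pvDiagStr, dif_pos h]
        rw [pvDiagA, dif_pos h, hstr, pv_windows_cons, ← hstr]
        congr 1
        · congr 1
          rw [pv_diag_take g n m 4 x y]
        · rw [ih (x + 1) (y + 1) (by omega)]
      · rw [pvDiagA, dif_neg h, pvDiagStr, dif_neg h]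
        rfl

theorem pv_adiag_eq (g : List (List Char)) (n m : Nat) :
    ∀ (c : Nat) (x : Nat) (y : Int), n - x ≤ c → y < (m : Int) →
      pvAdiagA g n m x y = pvTails (pvAdiagStr (g.map (fun r => r.take m)) n x y) := by
  intro c
  induction c with
  | zero =>
      intro x y hc hy
      rw [pvAdiagA, dif_neg (by omega), pvAdiagStr, dif_neg (by omega)]
      rfl
  | succ c ih =>
      intro x y hc hy
      by_cases h : x < n ∧ 0 ≤ y
      · have hstr : pvAdiagStr (g.map (fun r => r.take m)) n x y
            = ((g.map (fun r => r.take m)).getD x []).getD y.toNat ' '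
              :: pvAdiagStr (g.map (fun r => r.take m)) n (x + 1) (y - 1) := by
          rw [pvAdiagStr, dif_pos h]
        rw [pvAdiagA, dif_pos h, hstr, pv_windows_cons, ← hstr]
        congr 1
        · congr 1
          rw [pv_adiag_take g n m 4 x y hy]
        · rw [ih (x + 1) (y - 1) (by omega) (by omega)]
      · rw [pvAdiagA, dif_neg h, pvAdiagStr, dif_neg h]
        rfl

theorem pv_main (grid : List String) (hpre : Pre_flat grid) : flat grid = flat_alt grid := by
  obtain ⟨hne, hge⟩ := hpre
  have hg : ∀ r ∈ grid.map String.toList, grid.headI.length ≤ r.length := by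
    intro r hr
    rcases List.mem_map.mp hr with ⟨s, hs, rfl⟩
    simpa using hge s hs
  have hgne : grid.map String.toList ≠ [] := by simpa using hne
  have hrows : grid.map (fun s => s.toList.take grid.headI.length)
      = (grid.map String.toList).map (fun r => r.take grid.headI.length) := by
    rw [List.map_map]; rfl
  simp only [flat, flat_alt]
  rw [hrows]
  rw [show grid.length = (grid.map String.toList).length from (List.length_map _).symm]
  generalize hGm : grid.headI.length = m at hg ⊢
  generalize hG : grid.map String.toList = g at hg hgne ⊢
  have hrlen : ∀ r ∈ g.map (fun r => r.take m), r.length = m := by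
    intro r hr
    rcases List.mem_map.mp hr with ⟨s, hs, rfl⟩
    rw [List.length_take, Nat.min_eq_left (hg s hs)]
  -- segment 1: rows
  have h1 : (List.range g.length).flatMap
        (fun i => (List.range (m - 3)).map fun j => String.ofList (((g.getD i []).drop j).take 4))
      = (g.map fun r => r.take m).flatMap pvWin4 := by
    rw [pv_flatMap_range_getD g [] (fun r => (List.range (m - 3)).map fun j => String.ofList ((r.drop j).take 4))]
    rw [List.flatMap_map]
    apply pv_flatMap_congr
    intro r hr
    rw [pv_win4_eq]
    rw [show (r.take m).length = m from by rw [List.length_take, Nat.min_eq_left (hg r hr)]]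
    apply List.map_congr_left
    intro j hj
    rw [pv_window_take r (by simp at hj; omega)]
  -- segment 2: columns
  have hmin : ((g.map (fun r => r.take m)).map List.length).min? = some m := by
    apply pv_min?_const
    · simpa using hgne
    · intro x hx
      rcases List.mem_map.mp hx with ⟨r, hr, rfl⟩
      exact hrlen r hr
  have h2 : (List.range m).flatMap
        (fun j => (List.range (g.length - 3)).map fun i =>
          String.ofList ((List.range 4).map fun k => (g.getD (i + k) []).getD j ' '))
      = (pvZipStar (g.map fun r => r.take m)).flatMap pvWin4 := by
    unfold pvZipStar
    rw [hmin]
    simp only [Option.getD_some, List.flatMap_map]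
    apply pv_flatMap_congr
    intro j hj
    simp only [List.mem_range] at hj
    have hcol : (g.map fun r => r.take m).map (fun r => r.getD j ' ')
        = (List.range g.length).map fun i => ((g.map fun r => r.take m).getD i []).getD j ' ' := by
      rw [show g.length = ((g.map fun r => r.take m)).length from (List.length_map _).symm]
      rw [pv_map_range_getD ((g.map fun r => r.take m)) [] (fun r => r.getD j ' ')]
    rw [hcol, pv_win4_eq]
    simp only [List.length_map, List.length_range]
    apply List.map_congr_left
    intro i hi
    simp only [List.mem_range] at hi
    rw [pv_col_window (fun i => ((g.map fun r => r.take m).getD i []).getD j ' ') (by omega)]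
    congr 1
    apply List.map_congr_left
    intro k _
    rw [pv_getD_map_take, pv_getD_take_lt _ _ hj]
  -- segment 3: down-right diagonals
  have h3 : ∀ p : Nat × Nat, pvDiagA g g.length m p.1 p.2
      = pvTails ((List.range (min (g.length - p.1) (m - p.2))).map fun t =>
          ((g.map fun r => r.take m).getD (p.1 + t) []).getD (p.2 + t) ' ') := by
    intro p
    rw [pv_diag_eq g g.length m g.length p.1 p.2 (by omega)]
    rw [pv_diagStr_eq (g.map fun r => r.take m) g.length m g.length p.1 p.2 (by omega)]
  -- segment 4: down-left diagonals
  have h4 : ∀ p ∈ ((List.range m).map (fun j => ((0 : Nat), (j : Int)))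
        ++ (List.range' 1 (g.length - 1)).map fun i => (i, (m : Int) - 1)),
      pvAdiagA g g.length m p.1 p.2
      = pvTails ((List.range (min ((g.length : Int) - p.1) (p.2 + 1)).toNat).map fun t =>
          ((g.map fun r => r.take m).getD (p.1 + t) []).getD (p.2 - (t : Int)).toNat ' ') := by
    intro p hp
    have hy : p.2 < (m : Int) := by
      rcases List.mem_append.mp hp with hp | hp
      · rcases List.mem_map.mp hp with ⟨q, hq, rfl⟩
        simp at hq
        obtain ⟨r, hr, rfl⟩ := hq
        omega
      · rcases List.mem_map.mp hp with ⟨q, hq, rfl⟩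
        omega
    rw [pv_adiag_eq g g.length m g.length p.1 p.2 (by omega) hy]
    rw [pv_adiagStr_eq (g.map fun r => r.take m) g.length g.length p.1 p.2 (by omega)]
  rw [h1, h2, pv_flatMap_congr (fun p _ => h3 p), pv_flatMap_congr h4]

-- ===== VERDICT (by name: the statement is the Claim_ definition above) =====
theorem flat_spec : Claim_equal_flat := by
  intro grid _ hpre
  unfold Spec_flat
  exact pv_main grid hpre
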